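-- pv_equiv track=rewrite | github.com/RobertJeon/TIL | Area/baekjoon/11725.py | dfs_recur
-- ===== SOURCE A (Python) =====
-- def dfs_recur(start, graph, pr, visited):
--     visited.add(start)
--     for node in graph[start]:
--         if node not in visited:
--             if pr[node-1] == 0:
--                 pr[node-1] = start
--             dfs_recur(node, graph, pr, visited)
--     return pr
-- ===== SOURCE B (Python) =====
-- _MISSING = object()
--
-- def dfs_recur(start, graph, pr, visited):
--     # Iterative DFS with an explicit stack of (node, iterator) frames
--     # instead of recursion; same pr/visited mutations in the same order.
--     visited.add(start)
--     stack = [(start, iter(graph[start]))]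
--     while stack:
--         cur, it = stack[-1]
--         nxt = next(it, _MISSING)
--         if nxt is _MISSING:
--             stack.pop()
--         elif nxt not in visited:
--             if pr[nxt - 1] == 0:
--                 pr[nxt - 1] = cur
--             visited.add(nxt)
--             stack.append((nxt, iter(graph[nxt])))
--     return pr
-- ===== Notes on version B (the rewrite author's own statement) =====
-- stated objective: alternative
-- what changed: Replaces A's recursive DFS by an iterative DFS over an explicit stack of (node, neighbour-iterator) frames, re-checking visited on resume so parent assignments match exactly.
import Mathlib
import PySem

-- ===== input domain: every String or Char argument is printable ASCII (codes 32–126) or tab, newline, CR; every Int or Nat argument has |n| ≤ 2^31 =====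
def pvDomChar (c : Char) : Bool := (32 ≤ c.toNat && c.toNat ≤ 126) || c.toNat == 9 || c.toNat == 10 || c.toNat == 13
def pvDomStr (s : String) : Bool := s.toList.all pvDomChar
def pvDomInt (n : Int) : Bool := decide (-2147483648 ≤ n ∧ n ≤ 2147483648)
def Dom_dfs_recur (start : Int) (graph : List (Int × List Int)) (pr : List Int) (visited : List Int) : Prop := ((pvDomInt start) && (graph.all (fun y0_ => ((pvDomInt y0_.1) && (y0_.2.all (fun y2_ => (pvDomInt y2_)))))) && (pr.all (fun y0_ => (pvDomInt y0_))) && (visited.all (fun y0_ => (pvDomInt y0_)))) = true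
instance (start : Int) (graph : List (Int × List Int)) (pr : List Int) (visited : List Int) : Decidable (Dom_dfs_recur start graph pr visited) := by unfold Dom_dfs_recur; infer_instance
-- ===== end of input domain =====

-- B replaces A's recursive DFS by an iterative DFS over an explicit stack of
-- (node, remaining-neighbours) frames (objective: alternative decomposition, same cost);
-- equivalence is about the RETURN value only (the Python A mutates pr/visited in place;
-- the Python B performs the same mutations).

-- ===== PORT A =====
-- graph[k] (total form; Pre_ guarantees the key is present wherever A looks one up)
def pvAdj (graph : List (Int × List Int)) (k : Int) : List Int :=
  PySem.Dict.getD (PySem.Dict.mk graph) k []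

-- `if pr[node-1] == 0: pr[node-1] = cur` (total forms; Pre_ guarantees the index is in range)
def pvUpd (pr : List Int) (cur node : Int) : List Int :=
  if PySem.List.pyGetD pr (node - 1) 0 = 0 then PySem.List.pySetD pr (node - 1) cur else pr

-- A's recursion, with a fuel argument for totality only (graph.length + 1 always suffices:
-- every recursive call is on a node not yet visited, which is then marked visited).
-- State is the (pr, visited) pair that Python mutates in place.
def pvDfsA (graph : List (Int × List Int)) : Nat → Int → List Int → List Int → List Int × List Int
  | 0, start, pr, visited => (pr, PySem.Set.add visited start)
  | fuel+1, start, pr, visited =>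
    (pvAdj graph start).foldl
      (fun st node =>
        if PySem.Set.contains st.2 node then st
        else pvDfsA graph fuel node (pvUpd st.1 start node) st.2)
      (pr, PySem.Set.add visited start)

def dfs_recur (start : Int) (graph : List (Int × List Int)) (pr : List Int) (visited : List Int) : List Int :=
  (pvDfsA graph (graph.length + 1) start pr visited).1

-- ===== PORT B =====
-- B's while loop over the explicit stack of (node, remaining-iterator) frames; fuel is a
-- totality device only, consumed exclusively at pushes (each push visits a fresh node).
def pvRunB (graph : List (Int × List Int)) : Nat → List (Int × List Int) → List Int → List Int → List Int
  | _, [], pr, _ => pr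
  | fuel, (_, []) :: S, pr, visited => pvRunB graph fuel S pr visited
  | 0, (cur, nxt :: rest) :: S, pr, visited =>
    if PySem.Set.contains visited nxt then pvRunB graph 0 ((cur, rest) :: S) pr visited
    else pr
  | fuel+1, (cur, nxt :: rest) :: S, pr, visited =>
    if PySem.Set.contains visited nxt then pvRunB graph (fuel+1) ((cur, rest) :: S) pr visited
    else
      pvRunB graph fuel ((nxt, pvAdj graph nxt) :: (cur, rest) :: S)
        (pvUpd pr cur nxt) (PySem.Set.add visited nxt)
  termination_by fuel stack => (fuel, (stack.map (fun f => f.2.length)).sum + stack.length)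
  decreasing_by
  all_goals first
    | (apply Prod.Lex.left; omega)
    | (apply Prod.Lex.right; simp; try omega)

def dfs_recur_alt (start : Int) (graph : List (Int × List Int)) (pr : List Int) (visited : List Int) : List Int :=
  pvRunB graph (2 * (graph.flatMap (fun p => p.2)).length + 1)
    [(start, pvAdj graph start)] pr (PySem.Set.add visited start)

-- ===== PRECONDITION & SPEC =====
-- Pre_ holds exactly where the Python A returns normally (no KeyError/IndexError): start is a
-- key, and every node the DFS visits — i.e. reachable from start through nodes not initially
-- visited — is a key of graph whose pr[node-1] index is in range (not needed for start or for
-- initially-visited nodes, which are never index-checked).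
def pvReachStep (graph : List (Int × List Int)) (vis0 : List Int) (V : Finset Int) : Finset Int :=
  V ∪ ((graph.filter (fun p => decide (p.1 ∈ V))).flatMap
        (fun p => p.2.filter (fun m => decide (m ∉ vis0)))).toFinset

def pvReach (graph : List (Int × List Int)) (vis0 : List Int) (start : Int) : Finset Int :=
  (pvReachStep graph vis0)^[graph.length + 2] {start}

def Pre_dfs_recur (start : Int) (graph : List (Int × List Int)) (pr : List Int) (visited : List Int) : Prop :=
  start ∈ graph.map Prod.fst ∧
  ∀ m ∈ pvReach graph visited start,
    m ∈ graph.map Prod.fst ∧ (m = start ∨ m ∈ visited ∨ PySem.Raise.InRange pr.length (m - 1))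

instance (start : Int) (graph : List (Int × List Int)) (pr : List Int) (visited : List Int) : Decidable (Pre_dfs_recur start graph pr visited) := by
  unfold Pre_dfs_recur; infer_instance

def pvWitness_dfs_recur : Int × (List (Int × List Int)) × List Int × List Int :=
  (1, [(1, [2]), (2, [1])], [0, 0], [])

def Spec_dfs_recur (start : Int) (graph : List (Int × List Int)) (pr : List Int) (visited : List Int) (out : List Int) : Prop := out = dfs_recur_alt start graph pr visited
instance (start : Int) (graph : List (Int × List Int)) (pr : List Int) (visited : List Int) (out : List Int) : Decidable (Spec_dfs_recur start graph pr visited out) := by unfold Spec_dfs_recur; infer_instance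

-- ===== CLAIM (what is proved, stated in full; the proofs are below) =====
def Claim_equal_dfs_recur : Prop := ∀ (start : Int) (graph : List (Int × List Int)) (pr : List Int) (visited : List Int), Dom_dfs_recur start graph pr visited → Pre_dfs_recur start graph pr visited → Spec_dfs_recur start graph pr visited (dfs_recur start graph pr visited)

-- ===== LEMMAS AND PROOFS =====

-- the step of A's neighbour loop, named so the fold can be talked about
def pvAStep (graph : List (Int × List Int)) (a : Nat) (cur : Int) (st : List Int × List Int) (node : Int) : List Int × List Int :=
  if PySem.Set.contains st.2 node then st
  else pvDfsA graph a node (pvUpd st.1 cur node) st.2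

theorem pvDfsA_succ (graph : List (Int × List Int)) (f : Nat) (s : Int) (pr v : List Int) :
    pvDfsA graph (f+1) s pr v = (pvAdj graph s).foldl (pvAStep graph f s) (pr, PySem.Set.add v s) := rfl

-- keys of graph not yet visited
def pvUnvis (graph : List (Int × List Int)) (v : List Int) : Nat :=
  ((graph.map Prod.fst).toFinset.filter (fun k => k ∉ v)).card

-- nodes that B's machine can still push: any listed neighbour or stacked remainder not visited
def pvPb (graph : List (Int × List Int)) (stack : List (Int × List Int)) (v : List Int) : Nat :=
  (((graph.flatMap (fun p => p.2)).toFinset ∪ (stack.flatMap (fun f => f.2)).toFinset).filter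
    (fun k => k ∉ v)).card

theorem pvContains_iff (v : List Int) (x : Int) : PySem.Set.contains v x = true ↔ x ∈ v := by
  simp [PySem.Set.contains]

theorem pvMem_add (v : List Int) (x y : Int) : y ∈ PySem.Set.add v x ↔ y ∈ v ∨ y = x :=
  PySem.Set.mem_add v x y

theorem pvAdj_nil (s : Int) : pvAdj [] s = [] := rfl

theorem pvAdj_cons (k : Int) (b : List Int) (t : List (Int × List Int)) (s : Int) :
    pvAdj ((k, b) :: t) s = if k = s then b else pvAdj t s := by
  simp only [pvAdj, PySem.Dict.getD, PySem.Dict.get?_mk_cons, beq_iff_eq]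
  by_cases h : k = s <;> simp [h]

theorem pvAdj_sub (graph : List (Int × List Int)) (s : Int) :
    ∀ x ∈ pvAdj graph s, x ∈ graph.flatMap (fun p => p.2) := by
  induction graph with
  | nil => simp [pvAdj_nil]
  | cons p t ih =>
      obtain ⟨k, b⟩ := p
      intro x hx
      rw [pvAdj_cons] at hx
      rw [List.flatMap_cons, List.mem_append]
      by_cases h : k = s
      · rw [if_pos h] at hx; exact Or.inl hx
      · rw [if_neg h] at hx; exact Or.inr (ih x hx)

theorem pvAdj_len (graph : List (Int × List Int)) (s : Int) :
    (pvAdj graph s).length ≤ (graph.flatMap (fun p => p.2)).length := by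
  induction graph with
  | nil => simp [pvAdj_nil]
  | cons p t ih =>
      obtain ⟨k, b⟩ := p
      rw [pvAdj_cons, List.flatMap_cons, List.length_append]
      by_cases h : k = s
      · rw [if_pos h]; exact Nat.le_add_right _ _
      · rw [if_neg h]; exact le_trans ih (Nat.le_add_left _ _)

theorem pvAdj_not_key (graph : List (Int × List Int)) (s : Int) :
    s ∉ graph.map Prod.fst → pvAdj graph s = [] := by
  induction graph with
  | nil => intro _; rfl
  | cons p t ih =>
      obtain ⟨k, b⟩ := p
      intro h
      rw [List.map_cons, List.mem_cons] at h
      rw [pvAdj_cons, if_neg (fun e => h (Or.inl e.symm))]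
      exact ih (fun hm => h (Or.inr hm))

theorem pvDfsA_nilAdj (graph : List (Int × List Int)) (f : Nat) (s : Int) (pr v : List Int)
    (h : pvAdj graph s = []) : pvDfsA graph f s pr v = (pr, PySem.Set.add v s) := by
  cases f <;> simp [pvDfsA, h]

theorem pvDfsA_mono (graph : List (Int × List Int)) :
    ∀ (f : Nat) (s : Int) (pr v : List Int) (x : Int),
      (x ∈ v ∨ x = s) → x ∈ (pvDfsA graph f s pr v).2 := by
  intro f
  induction f with
  | zero => intro s pr v x hx; simpa [pvDfsA, pvMem_add] using hx
  | succ f ih =>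
      intro s pr v x hx
      rw [pvDfsA_succ]
      have hx' : x ∈ PySem.Set.add v s := (pvMem_add v s x).2 hx
      have key : ∀ (rest : List Int) (st : List Int × List Int),
          x ∈ st.2 → x ∈ (rest.foldl (pvAStep graph f s) st).2 := by
        intro rest
        induction rest with
        | nil => intro st h; simpa using h
        | cons n r ihr =>
            intro st h
            simp only [List.foldl_cons]
            by_cases hc : PySem.Set.contains st.2 n
            · rw [pvAStep, if_pos hc]; exact ihr st h
            · rw [pvAStep, if_neg hc]
              exact ihr _ (ih n (pvUpd st.1 s n) st.2 x (Or.inl h))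
      exact key (pvAdj graph s) (pr, PySem.Set.add v s) hx'

theorem pvUnvis_anti (graph : List (Int × List Int)) {v v' : List Int}
    (h : ∀ x, x ∈ v → x ∈ v') : pvUnvis graph v' ≤ pvUnvis graph v := by
  apply Finset.card_le_card
  intro x hx
  simp only [Finset.mem_filter] at *
  exact ⟨hx.1, fun hv => hx.2 (h x hv)⟩

theorem pvUnvis_add_le (graph : List (Int × List Int)) (v : List Int) (n : Int) :
    pvUnvis graph (PySem.Set.add v n) ≤ pvUnvis graph v :=
  pvUnvis_anti graph (fun x hx => (pvMem_add v n x).2 (Or.inl hx))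

theorem pvUnvis_add_lt (graph : List (Int × List Int)) (v : List Int) (n : Int)
    (hk : n ∈ graph.map Prod.fst) (hn : n ∉ v) :
    pvUnvis graph (PySem.Set.add v n) < pvUnvis graph v := by
  apply Finset.card_lt_card
  constructor
  · intro x hx
    simp only [Finset.mem_filter] at *
    exact ⟨hx.1, fun hv => hx.2 ((pvMem_add v n x).2 (Or.inl hv))⟩
  · intro hsub
    have hmem : n ∈ (graph.map Prod.fst).toFinset.filter (fun k => k ∉ v) := by
      simp only [Finset.mem_filter, List.mem_toFinset]
      exact ⟨hk, hn⟩
    have := hsub hmem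
    simp only [Finset.mem_filter] at this
    exact this.2 ((pvMem_add v n n).2 (Or.inr rfl))

theorem pvUnvis_le_len (graph : List (Int × List Int)) (v : List Int) :
    pvUnvis graph v ≤ graph.length := by
  calc pvUnvis graph v ≤ (graph.map Prod.fst).toFinset.card := Finset.card_filter_le _ _
    _ ≤ (graph.map Prod.fst).length := List.toFinset_card_le _
    _ = graph.length := by simp

theorem pvPb_le_tail (graph : List (Int × List Int)) (c : Int) (r rest : List Int)
    (S : List (Int × List Int)) (v : List Int) (hsub : ∀ x, x ∈ r → x ∈ rest) :
    pvPb graph ((c, r) :: S) v ≤ pvPb graph ((c, rest) :: S) v := by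
  apply Finset.card_le_card
  intro x hx
  simp only [Finset.mem_filter, Finset.mem_union, List.mem_toFinset, List.flatMap_cons,
    List.mem_append] at *
  refine ⟨?_, hx.2⟩
  rcases hx.1 with h | h | h
  · exact Or.inl h
  · exact Or.inr (Or.inl (hsub x h))
  · exact Or.inr (Or.inr h)

theorem pvPb_pop (graph : List (Int × List Int)) (c : Int) (r : List Int)
    (S : List (Int × List Int)) (v : List Int) :
    pvPb graph S v ≤ pvPb graph ((c, r) :: S) v := by
  apply Finset.card_le_card
  intro x hx
  simp only [Finset.mem_filter, Finset.mem_union, List.mem_toFinset, List.flatMap_cons,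
    List.mem_append] at *
  exact ⟨by tauto, hx.2⟩

theorem pvPb_push_lt (graph : List (Int × List Int)) (c n : Int) (r adjn : List Int)
    (S : List (Int × List Int)) (v : List Int) (hn : n ∉ v)
    (hadj : ∀ x, x ∈ adjn → x ∈ graph.flatMap (fun p => p.2)) :
    pvPb graph ((n, adjn) :: (c, r) :: S) (PySem.Set.add v n) < pvPb graph ((c, n :: r) :: S) v := by
  apply Finset.card_lt_card
  constructor
  · intro x hx
    simp only [Finset.mem_filter, Finset.mem_union, List.mem_toFinset, List.flatMap_cons,
      List.mem_append, List.mem_cons] at hx ⊢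
    have hxv : x ∉ v := fun hv => hx.2 ((pvMem_add v n x).2 (Or.inl hv))
    refine ⟨?_, hxv⟩
    have hax := hadj x
    tauto
  · intro hsub
    have hmem : n ∈ ((graph.flatMap (fun p => p.2)).toFinset ∪
        (((c, n :: r) :: S).flatMap (fun f => f.2)).toFinset).filter (fun k => k ∉ v) := by
      simp only [Finset.mem_filter, Finset.mem_union, List.mem_toFinset, List.flatMap_cons,
        List.mem_append, List.mem_cons]
      exact ⟨by tauto, hn⟩
    have := hsub hmem
    simp only [Finset.mem_filter] at this
    exact this.2 ((pvMem_add v n n).2 (Or.inr rfl))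

theorem pvPb_pushpop_lt (graph : List (Int × List Int)) (c n : Int) (r : List Int)
    (S : List (Int × List Int)) (v : List Int) (hn : n ∉ v) :
    pvPb graph ((c, r) :: S) (PySem.Set.add v n) < pvPb graph ((c, n :: r) :: S) v :=
  lt_of_le_of_lt (pvPb_pop graph n ([] : List Int) ((c, r) :: S) (PySem.Set.add v n))
    (pvPb_push_lt graph c n r ([] : List Int) S v hn (by simp))

theorem pvPb_pos (graph : List (Int × List Int)) (c n : Int) (r : List Int)
    (S : List (Int × List Int)) (v : List Int) (hn : n ∉ v) :
    0 < pvPb graph ((c, n :: r) :: S) v := by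
  apply Finset.card_pos.2
  refine ⟨n, ?_⟩
  simp only [Finset.mem_filter, Finset.mem_union, List.mem_toFinset, List.flatMap_cons,
    List.mem_append, List.mem_cons]
  exact ⟨by tauto, hn⟩

theorem pvPb_init_le (graph : List (Int × List Int)) (s : Int) (v : List Int) :
    pvPb graph [(s, pvAdj graph s)] v ≤ 2 * (graph.flatMap (fun p => p.2)).length := by
  calc pvPb graph [(s, pvAdj graph s)] v
      ≤ ((graph.flatMap (fun p => p.2)).toFinset ∪
          ([(s, pvAdj graph s)].flatMap (fun f => f.2)).toFinset).card :=
        Finset.card_filter_le _ _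
    _ ≤ (graph.flatMap (fun p => p.2)).toFinset.card +
          ([(s, pvAdj graph s)].flatMap (fun f => f.2)).toFinset.card :=
        Finset.card_union_le _ _
    _ ≤ (graph.flatMap (fun p => p.2)).length + (pvAdj graph s).length := by
        have h1 := List.toFinset_card_le (graph.flatMap (fun p => p.2))
        have h2 := List.toFinset_card_le ([(s, pvAdj graph s)].flatMap (fun f => f.2))
        simp only [List.flatMap_cons, List.flatMap_nil, List.append_nil] at h2 ⊢
        omega
    _ ≤ 2 * (graph.flatMap (fun p => p.2)).length := by
        have := pvAdj_len graph s; omega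

theorem pvRunB_nil (graph : List (Int × List Int)) (f : Nat) (pr v : List Int) :
    pvRunB graph f [] pr v = pr := by rw [pvRunB.eq_def]

theorem pvRunB_pop (graph : List (Int × List Int)) (f : Nat) (c : Int)
    (S : List (Int × List Int)) (pr v : List Int) :
    pvRunB graph f ((c, []) :: S) pr v = pvRunB graph f S pr v := by
  cases f <;> rw [pvRunB.eq_def]

theorem pvRunB_skip (graph : List (Int × List Int)) (f : Nat) (c n : Int) (r : List Int)
    (S : List (Int × List Int)) (pr v : List Int) (hc : PySem.Set.contains v n = true) :
    pvRunB graph f ((c, n :: r) :: S) pr v = pvRunB graph f ((c, r) :: S) pr v := by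
  cases f <;> (rw [pvRunB.eq_def]; simp only [hc, if_true])

theorem pvRunB_push (graph : List (Int × List Int)) (f : Nat) (c n : Int) (r : List Int)
    (S : List (Int × List Int)) (pr v : List Int) (hc : PySem.Set.contains v n = false) :
    pvRunB graph (f + 1) ((c, n :: r) :: S) pr v =
      pvRunB graph f ((n, pvAdj graph n) :: (c, r) :: S) (pvUpd pr c n) (PySem.Set.add v n) := by
  rw [pvRunB.eq_def]; simp only [hc, Bool.false_eq_true, if_false]

-- B's machine gives the same answer for any two sufficient fuels
theorem pvRunB_stab (graph : List (Int × List Int)) :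
    ∀ (N : Nat) (stack : List (Int × List Int)) (pr v : List Int) (f₁ f₂ : Nat),
      pvPb graph stack v * ((graph.flatMap (fun p => p.2)).length + 1)
        + (stack.map (fun f => f.2.length)).sum + stack.length ≤ N →
      pvPb graph stack v ≤ f₁ → pvPb graph stack v ≤ f₂ →
      pvRunB graph f₁ stack pr v = pvRunB graph f₂ stack pr v := by
  intro N
  induction N with
  | zero =>
      intro stack pr v f₁ f₂ hm _ _
      have hs : stack = [] := by
        cases stack with
        | nil => rfl
        | cons a S => exfalso; simp at hm
      subst hs
      rw [pvRunB_nil, pvRunB_nil]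
  | succ N ih =>
      intro stack pr v f₁ f₂ hm h1 h2
      match stack with
      | [] => rw [pvRunB_nil, pvRunB_nil]
      | (c, []) :: S =>
          rw [pvRunB_pop, pvRunB_pop]
          have hP := pvPb_pop graph c ([] : List Int) S v
          apply ih S pr v f₁ f₂ _ (le_trans hP h1) (le_trans hP h2)
          have hmul := Nat.mul_le_mul hP
            (le_refl ((graph.flatMap (fun p => p.2)).length + 1))
          simp only [List.map_cons, List.sum_cons, List.length_cons] at hm ⊢
          omega
      | (c, n :: r) :: S =>
          cases hc : PySem.Set.contains v n with
          | true =>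
              rw [pvRunB_skip graph f₁ c n r S pr v hc, pvRunB_skip graph f₂ c n r S pr v hc]
              have hP := pvPb_le_tail graph c r (n :: r) S v (fun x hx => List.mem_cons_of_mem n hx)
              apply ih _ pr v f₁ f₂ _ (le_trans hP h1) (le_trans hP h2)
              have hmul := Nat.mul_le_mul hP
                (le_refl ((graph.flatMap (fun p => p.2)).length + 1))
              simp only [List.map_cons, List.sum_cons, List.length_cons] at hm ⊢
              omega
          | false =>
              have hn : n ∉ v := by
                intro h
                rw [(pvContains_iff v n).2 h] at hc
                exact Bool.noConfusion hc
              have hpos := pvPb_pos graph c n r S v hn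
              obtain ⟨f₁', rfl⟩ : ∃ m, f₁ = m + 1 := ⟨f₁ - 1, by omega⟩
              obtain ⟨f₂', rfl⟩ : ∃ m, f₂ = m + 1 := ⟨f₂ - 1, by omega⟩
              rw [pvRunB_push graph f₁' c n r S pr v hc, pvRunB_push graph f₂' c n r S pr v hc]
              have hP := pvPb_push_lt graph c n r (pvAdj graph n) S v hn (pvAdj_sub graph n)
              apply ih _ _ _ f₁' f₂' _ (by omega) (by omega)
              have hlen := pvAdj_len graph n
              have hmul := Nat.mul_le_mul
                (show pvPb graph ((n, pvAdj graph n) :: (c, r) :: S) (PySem.Set.add v n) + 1 ≤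
                    pvPb graph ((c, n :: r) :: S) v by omega)
                (le_refl ((graph.flatMap (fun p => p.2)).length + 1))
              rw [Nat.succ_mul] at hmul
              simp only [List.map_cons, List.sum_cons, List.length_cons] at hm ⊢
              omega

-- A's recursion gives the same answer for any two sufficient fuels
theorem pvDfsA_stab (graph : List (Int × List Int)) :
    ∀ (k : Nat) (s : Int) (pr v : List Int) (f₁ f₂ : Nat),
      pvUnvis graph (PySem.Set.add v s) ≤ k →
      pvUnvis graph (PySem.Set.add v s) < f₁ → pvUnvis graph (PySem.Set.add v s) < f₂ →
      pvDfsA graph f₁ s pr v = pvDfsA graph f₂ s pr v := by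
  intro k
  induction k using Nat.strong_induction_on with
  | _ k IH =>
  intro s pr v f₁ f₂ hk h1 h2
  obtain ⟨a, rfl⟩ : ∃ m, f₁ = m + 1 := ⟨f₁ - 1, by omega⟩
  obtain ⟨b, rfl⟩ : ∃ m, f₂ = m + 1 := ⟨f₂ - 1, by omega⟩
  rw [pvDfsA_succ, pvDfsA_succ]
  have hu : pvUnvis graph (PySem.Set.add v s) ≤ k := hk
  have fold : ∀ (rest : List Int) (st : List Int × List Int),
      pvUnvis graph st.2 ≤ pvUnvis graph (PySem.Set.add v s) →
      rest.foldl (pvAStep graph a s) st = rest.foldl (pvAStep graph b s) st := by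
    intro rest
    induction rest with
    | nil => intro st _; rfl
    | cons n r ihr =>
        intro st hst
        simp only [List.foldl_cons]
        by_cases hc : PySem.Set.contains st.2 n
        · rw [pvAStep, if_pos hc, pvAStep, if_pos hc]
          exact ihr st hst
        · have hn : n ∉ st.2 := fun h => hc ((pvContains_iff st.2 n).2 h)
          have hstep : pvDfsA graph a n (pvUpd st.1 s n) st.2 =
              pvDfsA graph b n (pvUpd st.1 s n) st.2 := by
            by_cases hkey : n ∈ graph.map Prod.fst
            · have hlt := pvUnvis_add_lt graph st.2 n hkey hn
              exact IH (pvUnvis graph (PySem.Set.add st.2 n)) (by omega) n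
                (pvUpd st.1 s n) st.2 a b (le_refl _) (by omega) (by omega)
            · rw [pvDfsA_nilAdj graph a n _ _ (pvAdj_not_key graph n hkey),
                pvDfsA_nilAdj graph b n _ _ (pvAdj_not_key graph n hkey)]
          rw [pvAStep, if_neg hc, pvAStep, if_neg hc, hstep]
          apply ihr
          have hmono : ∀ x, x ∈ st.2 →
              x ∈ (pvDfsA graph b n (pvUpd st.1 s n) st.2).2 :=
            fun x hx => pvDfsA_mono graph b n _ st.2 x (Or.inl hx)
          exact le_trans (pvUnvis_anti graph hmono) hst
  exact fold (pvAdj graph s) (pr, PySem.Set.add v s) (le_refl _)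

-- the simulation: one stack frame of B computes exactly A's neighbour loop
theorem pvMain (graph : List (Int × List Int)) :
    ∀ (k : Nat) (rest : List Int) (cur : Int) (S : List (Int × List Int))
      (pr v : List Int) (a f₁ f₂ : Nat),
      pvUnvis graph v ≤ k → pvUnvis graph v ≤ a →
      pvPb graph ((cur, rest) :: S) v ≤ f₁ →
      pvPb graph S (rest.foldl (pvAStep graph a cur) (pr, v)).2 ≤ f₂ →
      pvRunB graph f₁ ((cur, rest) :: S) pr v =
        pvRunB graph f₂ S (rest.foldl (pvAStep graph a cur) (pr, v)).1
          (rest.foldl (pvAStep graph a cur) (pr, v)).2 := by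
  intro k
  induction k using Nat.strong_induction_on with
  | _ k IH =>
  intro rest cur S pr v a f₁ f₂ hk ha h1 h2
  induction rest generalizing pr v f₁ f₂ with
  | nil =>
      simp only [List.foldl_nil] at h2 ⊢
      rw [pvRunB_pop]
      exact pvRunB_stab graph _ S pr v f₁ f₂ (le_refl _)
        (le_trans (pvPb_pop graph cur [] S v) h1) h2
  | cons n r ihr =>
      simp only [List.foldl_cons] at h2 ⊢
      cases hc : PySem.Set.contains v n with
      | true =>
          rw [pvRunB_skip graph f₁ cur n r S pr v hc]
          rw [pvAStep, if_pos hc] at h2 ⊢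
          exact ihr pr v f₁ f₂ hk ha
            (le_trans (pvPb_le_tail graph cur r (n :: r) S v
              (fun x hx => List.mem_cons_of_mem n hx)) h1) h2
      | false =>
          have hn : n ∉ v := by
            intro h
            rw [(pvContains_iff v n).2 h] at hc
            exact Bool.noConfusion hc
          have hcne : ¬ (PySem.Set.contains v n = true) := by
            intro h; rw [hc] at h; exact Bool.noConfusion h
          have hpos := pvPb_pos graph cur n r S v hn
          obtain ⟨f₁', rfl⟩ : ∃ m, f₁ = m + 1 := ⟨f₁ - 1, by omega⟩
          rw [pvRunB_push graph f₁' cur n r S pr v hc]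
          rw [pvAStep, if_neg hcne] at h2 ⊢
          by_cases hkey : n ∈ graph.map Prod.fst
          · -- the pushed frame runs A's recursion on n
            have hlt := pvUnvis_add_lt graph v n hkey hn
            have hPpush := pvPb_push_lt graph cur n r (pvAdj graph n) S v hn (pvAdj_sub graph n)
            have step1 := IH (pvUnvis graph (PySem.Set.add v n)) (by omega)
              (pvAdj graph n) n ((cur, r) :: S) (pvUpd pr cur n) (PySem.Set.add v n) a f₁'
              (pvPb graph ((cur, r) :: S)
                ((pvAdj graph n).foldl (pvAStep graph a n) (pvUpd pr cur n, PySem.Set.add v n)).2)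
              (le_refl _) (by omega) (by omega) (le_refl _)
            rw [step1]
            have hmid : ((pvAdj graph n).foldl (pvAStep graph a n)
                (pvUpd pr cur n, PySem.Set.add v n)) = pvDfsA graph a n (pvUpd pr cur n) v := by
              rw [← pvDfsA_succ]
              exact pvDfsA_stab graph (pvUnvis graph (PySem.Set.add v n)) n (pvUpd pr cur n) v
                (a + 1) a (le_refl _) (by omega) (by omega)
            rw [hmid]
            have hvsub : ∀ x, x ∈ v → x ∈ (pvDfsA graph a n (pvUpd pr cur n) v).2 :=
              fun x hx => pvDfsA_mono graph a n _ v x (Or.inl hx)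
            exact ihr (pvDfsA graph a n (pvUpd pr cur n) v).1
              (pvDfsA graph a n (pvUpd pr cur n) v).2 _ f₂
              (le_trans (pvUnvis_anti graph hvsub) hk)
              (le_trans (pvUnvis_anti graph hvsub) ha) (le_refl _) h2
          · -- an unlisted node: its frame is empty and pops immediately
            have hadj := pvAdj_not_key graph n hkey
            have hst : pvDfsA graph a n (pvUpd pr cur n) v = (pvUpd pr cur n, PySem.Set.add v n) :=
              pvDfsA_nilAdj graph a n _ v hadj
            rw [hst] at h2 ⊢
            rw [hadj, pvRunB_pop]
            have hP := pvPb_pushpop_lt graph cur n r S v hn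
            exact ihr (pvUpd pr cur n) (PySem.Set.add v n) f₁' f₂
              (le_trans (pvUnvis_add_le graph v n) hk)
              (le_trans (pvUnvis_add_le graph v n) ha) (by omega) h2

-- ===== VERDICT (by name: the statement is the Claim_ definition above) =====
theorem dfs_recur_spec : Claim_equal_dfs_recur := by
  intro start graph pr v _ _
  unfold Spec_dfs_recur dfs_recur dfs_recur_alt
  have hA : pvDfsA graph (graph.length + 1) start pr v =
      pvDfsA graph (pvUnvis graph (PySem.Set.add v start) + 1) start pr v := by
    apply pvDfsA_stab graph (pvUnvis graph (PySem.Set.add v start)) start pr v _ _ (le_refl _)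
    · have := pvUnvis_le_len graph (PySem.Set.add v start); omega
    · omega
  rw [hA, pvDfsA_succ]
  have hB := pvMain graph (pvUnvis graph (PySem.Set.add v start)) (pvAdj graph start) start []
    pr (PySem.Set.add v start) (pvUnvis graph (PySem.Set.add v start))
    (2 * (graph.flatMap (fun p => p.2)).length + 1)
    (pvPb graph []
      ((pvAdj graph start).foldl (pvAStep graph (pvUnvis graph (PySem.Set.add v start)) start)
        (pr, PySem.Set.add v start)).2)
    (le_refl _) (le_refl _)
    (by have := pvPb_init_le graph start (PySem.Set.add v start); omega) (le_refl _)
  rw [hB, pvRunB_nil]
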